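-- pv_equiv track=rewrite | github.com/Vishwa-Shah11/IntroToPython | Prereq_courses.py | get_deep
-- ===== SOURCE A (Python) =====
-- def get_deep(D):
--     deep = [ ]
--     maxpre = 1
--     for main in D:
--         if len(D[main]) > maxpre:
--             maxpre = len(D[main])
--             deep = [main]
--         elif len(D[main]) == maxpre:
--             deep.append(main)
--     return deep
-- ===== SOURCE B (Python) =====
-- def get_deep(D):
--     if not D:
--         return []
--     m = max(len(v) for v in D.values())
--     m = max(m, 1)
--     return [k for k in D if len(D[k]) == m]
-- ===== Notes on version B (the rewrite author's own statement) =====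
-- stated objective: simpler
-- what changed: Replaces the single-pass running-max accumulation with resets by a two-pass version: compute the maximum value length (floored at 1) once, then filter the keys with that length.
import Mathlib
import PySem

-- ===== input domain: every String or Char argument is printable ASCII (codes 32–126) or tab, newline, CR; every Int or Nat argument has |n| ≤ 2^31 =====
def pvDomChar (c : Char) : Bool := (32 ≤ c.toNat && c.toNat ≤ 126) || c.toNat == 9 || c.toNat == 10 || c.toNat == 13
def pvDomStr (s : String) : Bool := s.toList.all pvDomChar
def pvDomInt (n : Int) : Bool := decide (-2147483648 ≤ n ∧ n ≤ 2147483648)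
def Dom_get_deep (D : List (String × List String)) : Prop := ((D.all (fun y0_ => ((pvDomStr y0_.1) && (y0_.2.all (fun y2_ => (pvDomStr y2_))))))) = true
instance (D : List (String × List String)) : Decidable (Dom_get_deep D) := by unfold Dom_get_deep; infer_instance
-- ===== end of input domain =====

-- B computes the maximum value length (floored at 1) once, then filters the keys, instead of A's
-- single-pass running-max accumulation; same cost, plainer structure.

-- ===== PORT A =====
-- one loop over the dict, running maximum `maxpre` (starting at 1) and accumulator `deep`
def get_deep (D : List (String × List String)) : List String :=
  (D.foldl (fun (s : List String × Int) p =>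
      if (p.2.length : Int) > s.2 then ([p.1], (p.2.length : Int))
      else if (p.2.length : Int) == s.2 then (s.1 ++ [p.1], s.2)
      else s)
    (([] : List String), (1 : Int))).1

-- ===== PORT B =====
-- empty-dict guard; max(len(v) for v in D.values()); floor at 1; filter the keys
def get_deep_alt (D : List (String × List String)) : List String :=
  match PySem.List.max? (D.map (fun p => (p.2.length : Int))) (fun x => x) with
  | none => []
  | some m0 =>
      let m := max m0 1
      (D.filter (fun p => (p.2.length : Int) == m)).map Prod.fst

-- ===== PRECONDITION & SPEC =====
def Spec_get_deep (D : List (String × List String)) (out : List String) : Prop := out = get_deep_alt D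
instance (D : List (String × List String)) (out : List String) : Decidable (Spec_get_deep D out) := by unfold Spec_get_deep; infer_instance

-- ===== CLAIM (what is proved, stated in full; the proofs are below) =====
def Claim_equal_get_deep : Prop := ∀ (D : List (String × List String)), Dom_get_deep D → Spec_get_deep D (get_deep D)

-- ===== LEMMAS AND PROOFS =====

-- A's loop body, named for the lemmas
def pvStep (s : List String × Int) (p : String × List String) : List String × Int :=
  if (p.2.length : Int) > s.2 then ([p.1], (p.2.length : Int))
  else if (p.2.length : Int) == s.2 then (s.1 ++ [p.1], s.2)
  else s

-- running maximum of the value lengths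
def pvMax (L : List (String × List String)) (m : Int) : Int :=
  L.foldl (fun a p => max a (p.2.length : Int)) m

lemma pvMax_ge (L : List (String × List String)) (m : Int) : m ≤ pvMax L m := by
  induction L generalizing m with
  | nil => simp [pvMax]
  | cons x t ih =>
      calc m ≤ max m (x.2.length : Int) := le_max_left _ _
        _ ≤ pvMax t (max m (x.2.length : Int)) := ih _

lemma pvMax_max (L : List (String × List String)) (m b : Int) :
    max (pvMax L m) b = pvMax L (max m b) := by
  induction L generalizing m with
  | nil => simp [pvMax]
  | cons x t ih =>
      simp only [pvMax, List.foldl_cons] at *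
      rw [ih (max m (x.2.length : Int)), max_right_comm]

-- invariant of A's loop: from any state (d, m) it computes the running max and
-- the keys of the suffix whose length equals it (prefixed by d when the max is unchanged)
lemma pvLoop_inv (L : List (String × List String)) (d : List String) (m : Int) :
    L.foldl pvStep (d, m) =
      ((if pvMax L m = m then d else []) ++
        (L.filter (fun p => (p.2.length : Int) == pvMax L m)).map Prod.fst,
       pvMax L m) := by
  induction L generalizing d m with
  | nil => simp [pvMax]
  | cons x t ih =>
      have hle : m ≤ pvMax (x :: t) m := pvMax_ge _ _
      simp only [List.foldl_cons, pvStep]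
      have hmax : pvMax (x :: t) m = pvMax t (max m (x.2.length : Int)) := by
        simp [pvMax]
      by_cases h1 : (x.2.length : Int) > m
      · simp only [if_pos h1]
        rw [ih]
        have hm : pvMax (x :: t) m = pvMax t (x.2.length : Int) := by
          rw [hmax]; congr 1; omega
        have hge : (x.2.length : Int) ≤ pvMax t (x.2.length : Int) := pvMax_ge _ _
        rw [hm]
        by_cases h2 : pvMax t (x.2.length : Int) = (x.2.length : Int)
        · simp [h2, List.filter_cons]
          intro h; exact absurd h (by omega)
        · have : ¬ ((x.2.length : Int) == pvMax t (x.2.length : Int)) = true := by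
            simp; omega
          simp [h2, List.filter_cons, this]
          intro h; exact absurd h (by omega)
      · simp only [if_neg h1]
        by_cases h2 : ((x.2.length : Int) == m) = true
        · have hx : (x.2.length : Int) = m := by simpa using h2
          simp only [if_pos h2]
          rw [ih]
          have hm : pvMax (x :: t) m = pvMax t m := by
            rw [hmax]; congr 1; omega
          rw [hm]
          by_cases h3 : pvMax t m = m
          · simp [h3, List.filter_cons, hx]
          · have hgt : m < pvMax t m := lt_of_le_of_ne (pvMax_ge _ _) (Ne.symm h3)
            have : ¬ ((x.2.length : Int) == pvMax t m) = true := by simp [hx]; omega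
            simp [h3, List.filter_cons, this]
        · simp only [if_neg h2]
          rw [ih]
          have hlt : (x.2.length : Int) < m := by
            simp at h2; omega
          have hm : pvMax (x :: t) m = pvMax t m := by
            rw [hmax]; congr 1; omega
          rw [hm]
          have : ¬ ((x.2.length : Int) == pvMax t m) = true := by
            have := pvMax_ge t m; simp; omega
          simp [List.filter_cons, this]

-- ===== VERDICT (by name: the statement is the Claim_ definition above) =====
theorem get_deep_spec : Claim_equal_get_deep := by
  intro D _
  unfold Spec_get_deep get_deep get_deep_alt
  cases D with
  | nil => simp [PySem.List.max?]
  | cons x t =>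
      have hfold : (x :: t).foldl (fun (s : List String × Int) p =>
          if (p.2.length : Int) > s.2 then ([p.1], (p.2.length : Int))
          else if (p.2.length : Int) == s.2 then (s.1 ++ [p.1], s.2)
          else s) (([] : List String), (1 : Int))
          = (x :: t).foldl pvStep (([] : List String), (1 : Int)) := rfl
      rw [hfold, pvLoop_inv]
      have hmax? : PySem.List.max? ((x :: t).map (fun p => (p.2.length : Int))) (fun y => y)
          = some ((t.map (fun p => (p.2.length : Int))).foldl max (x.2.length : Int)) := by
        simp only [List.map_cons]
        exact PySem.List.max?_id_cons _ _
      rw [hmax?]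
      have hfm : (t.map (fun p => (p.2.length : Int))).foldl max (x.2.length : Int)
          = pvMax t (x.2.length : Int) := by
        simp [pvMax, List.foldl_map]
      have hkey : max (pvMax t (x.2.length : Int)) 1 = pvMax (x :: t) 1 := by
        rw [pvMax_max]
        simp [pvMax, max_comm]
      simp only [hfm, hkey]
      split_ifs with h
      · simp
      · simp
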